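-- pv_equiv track=rewrite | github.com/wggraham/interview-prep | interviewbit/Backtracking/combination-sum-ii.py | permutationSum3
-- ===== SOURCE A (Python) =====
-- def permutationSum3(A, B):
--     A.sort()
--     allPerms = []
--
--     def getPerms(a, seen, perm, target):
--         if target == 0:
--             allPerms.append(perm)
--
--         for i, v in enumerate(a):
--             if target < v:
--                 break
--             if v in seen:
--                 continue
--             seen.add(v)
--             getPerms(a[:i] + a[i + 1:], set(), perm + [v], target - v)
--
--     getPerms(A, set(), [], B)
--     return allPerms
-- ===== SOURCE B (Python) =====
-- def permutationSum3(A, B):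
--     A.sort()
--     n = len(A)
--     used = [False] * n
--     allPerms = []
--
--     def getPerms(perm, target):
--         if target == 0:
--             allPerms.append(list(perm))
--         for i in range(n):
--             if used[i]:
--                 continue
--             if target < A[i]:
--                 break
--             if i > 0 and A[i] == A[i - 1] and not used[i - 1]:
--                 continue
--             used[i] = True
--             perm.append(A[i])
--             getPerms(perm, target - A[i])
--             perm.pop()
--             used[i] = False
--
--     getPerms([], B)
--     return allPerms
-- ===== Notes on version B (the rewrite author's own statement) =====
-- stated objective: alternative
-- what changed: A backtracks by building a fresh sliced copy a[:i]+a[i+1:] and a fresh per-level seen set at every node; B backtracks over the one fixed sorted array with a boolean used[] mask and one mutable perm, deduplicating by the sorted-adjacent rule A[i]==A[i-1] and not used[i-1] instead of a seen set.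
import Mathlib
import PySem

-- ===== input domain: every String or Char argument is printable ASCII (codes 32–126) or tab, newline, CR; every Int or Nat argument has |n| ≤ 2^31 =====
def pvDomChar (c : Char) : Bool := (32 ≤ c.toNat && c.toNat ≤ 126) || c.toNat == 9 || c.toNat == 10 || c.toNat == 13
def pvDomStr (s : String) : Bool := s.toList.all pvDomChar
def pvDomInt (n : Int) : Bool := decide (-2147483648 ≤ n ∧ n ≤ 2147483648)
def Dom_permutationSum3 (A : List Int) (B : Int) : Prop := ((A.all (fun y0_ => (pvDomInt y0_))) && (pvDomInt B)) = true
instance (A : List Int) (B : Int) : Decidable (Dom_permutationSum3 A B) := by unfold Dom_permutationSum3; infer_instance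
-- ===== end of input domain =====

-- B replaces A's per-level sliced copies (a[:i]+a[i+1:]) and per-level seen sets by backtracking
-- over the one fixed sorted array with a boolean used[] mask and the sorted-adjacent dedup rule
-- (alternative decomposition; both A and B sort the argument list in place — the theorems below
-- are about the RETURN value).

-- ===== PORT A =====
-- termination helper for pvLoopB (cited in its decreasing_by)
lemma pvCountFalseSet (l : List Bool) (i : Nat) (hi : i < l.length) (h : l[i] = false) :
    (l.set i true).count false + 1 = l.count false := by
  induction l generalizing i with
  | nil => simp at hi
  | cons b t ih =>
    cases i with
    | zero => simp_all
    | succ j =>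
      have hrw : (b :: t).set (j+1) true = b :: t.set j true := rfl
      rw [hrw]
      simp only [List.count_cons]
      have := ih j (by simpa using hi) (by simpa using h)
      omega

-- A's `for i, v in enumerate(a)` with slices a[:i] + a[i+1:] is the recursion pvLoopA over
-- `rest`, carrying the already-passed prefix `pre` (so a[:i] + a[i+1:] = pre ++ rs).
mutual
def pvGetPermsA (a : List Int) (seen : PySem.Set Int) (perm : List Int) (target : Int) :
    List (List Int) :=
  (if target = 0 then [perm] else []) ++ pvLoopA [] a seen perm target
termination_by (a.length, a.length + 1)
decreasing_by simp; omega

def pvLoopA (pre rest : List Int) (seen : PySem.Set Int) (perm : List Int) (target : Int) :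
    List (List Int) :=
  match rest with
  | [] => []
  | v :: rs =>
    if target < v then []
    else if PySem.Set.contains seen v then
      pvLoopA (pre ++ [v]) rs seen perm target
    else
      pvGetPermsA (pre ++ rs) PySem.Set.empty (perm ++ [v]) (target - v)
        ++ pvLoopA (pre ++ [v]) rs (PySem.Set.add seen v) perm target
termination_by (pre.length + rest.length, rest.length)
decreasing_by all_goals simp; omega
end

def permutationSum3 (A : List Int) (B : Int) : List (List Int) :=
  pvGetPermsA (PySem.List.sorted A (fun x => x) false) PySem.Set.empty [] B

-- ===== PORT B =====
-- (the `i < used.length` half of the guard is a totality guard only: used always has S.length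
-- entries; `for i in range(n)` with early `break` is the recursion pvLoopB on the index i)
mutual
def pvGetPermsB (S : List Int) (used : List Bool) (perm : List Int) (target : Int) :
    List (List Int) :=
  (if target = 0 then [perm] else []) ++ pvLoopB S used 0 perm target
termination_by (used.count false, S.length + 1)
decreasing_by exact Prod.Lex.right _ (by omega)

def pvLoopB (S : List Int) (used : List Bool) (i : Nat) (perm : List Int) (target : Int) :
    List (List Int) :=
  if hi : i < S.length ∧ i < used.length then
    if hu : used[i]'hi.2 = true then pvLoopB S used (i+1) perm target
    else
      if target < S[i]'hi.1 then []
      else if 0 < i ∧ S[i-1]? = some (S[i]'hi.1) ∧ used.getD (i-1) false = false then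
        pvLoopB S used (i+1) perm target
      else
        pvGetPermsB S (used.set i true) (perm ++ [S[i]'hi.1]) (target - S[i]'hi.1)
          ++ pvLoopB S used (i+1) perm target
  else []
termination_by (used.count false, S.length - i)
decreasing_by
  · exact Prod.Lex.right _ (by omega)
  · exact Prod.Lex.right _ (by omega)
  · exact Prod.Lex.left _ _ (by have := pvCountFalseSet used i hi.2 (by simpa using hu); omega)
  · exact Prod.Lex.right _ (by omega)
end

def permutationSum3_alt (A : List Int) (B : Int) : List (List Int) :=
  let S := PySem.List.sorted A (fun x => x) false
  pvGetPermsB S (List.replicate S.length false) [] B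

-- ===== PRECONDITION & SPEC =====
def Spec_permutationSum3 (A : List Int) (B : Int) (out : List (List Int)) : Prop := out = permutationSum3_alt A B
instance (A : List Int) (B : Int) (out : List (List Int)) : Decidable (Spec_permutationSum3 A B out) := by unfold Spec_permutationSum3; infer_instance

-- ===== CLAIM (what is proved, stated in full; the proofs are below) =====
def Claim_equal_permutationSum3 : Prop := ∀ (A : List Int) (B : Int), Dom_permutationSum3 A B → Spec_permutationSum3 A B (permutationSum3 A B)

-- ===== LEMMAS AND PROOFS =====

-- the values of S left at the positions the mask has not used yet, read off S.zip used
def pvRem (Z : List (Int × Bool)) : List Int :=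
  Z.filterMap (fun p => if p.2 then none else some p.1)

-- mask invariant: inside a block of equal values, used positions are closed downward
def pvInv (S : List Int) (used : List Bool) : Prop :=
  ∀ j : Nat, used[j+1]? = some true → S[j]? = S[j+1]? → used[j]? = some true

lemma pvRem_nil : pvRem [] = [] := rfl

lemma pvRem_cons_true (x : Int) (Z : List (Int × Bool)) :
    pvRem ((x, true) :: Z) = pvRem Z := by simp [pvRem]

lemma pvRem_cons_false (x : Int) (Z : List (Int × Bool)) :
    pvRem ((x, false) :: Z) = x :: pvRem Z := by simp [pvRem]

lemma pvRem_append (Y Z : List (Int × Bool)) : pvRem (Y ++ Z) = pvRem Y ++ pvRem Z := by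
  simp [pvRem]

lemma mem_pvRem (Z : List (Int × Bool)) (x : Int) :
    x ∈ pvRem Z ↔ ∃ p ∈ Z, p.2 = false ∧ p.1 = x := by
  simp only [pvRem, List.mem_filterMap]
  constructor
  · rintro ⟨⟨a, b⟩, hm, hf⟩
    cases b <;> simp_all
  · rintro ⟨⟨a, b⟩, hm, h2, h1⟩
    exact ⟨(a, b), hm, by simp_all⟩

lemma pvMono (S : List Int) (hs : S.Pairwise (fun a b => a ≤ b)) (a b : Nat)
    (hab : a ≤ b) (hb : b < S.length) : S[a]'(by omega) ≤ S[b] := by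
  rcases Nat.lt_or_ge a b with h | h
  · exact (List.pairwise_iff_getElem.mp hs) a b (by omega) hb h
  · have : a = b := by omega
    subst this; exact le_refl _

lemma pvInv_down (S : List Int) (used : List Bool) (hInv : pvInv S used) :
    ∀ d k, used[k+d]? = some true → (∀ e, e < d → S[k+e]? = S[k+e+1]?) →
      used[k]? = some true := by
  intro d
  induction d with
  | zero => intro k h _; simpa using h
  | succ d ih =>
    intro k h he
    have hidx : k + (d+1) = (k+d) + 1 := by omega
    rw [hidx] at h
    have h1 : used[k+d]? = some true := hInv (k+d) h (he d (by omega))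
    exact ih k h1 (fun e hed => he e (by omega))

-- the per-level seen-set test equals B's adjacent-duplicate test
lemma pvSeen_iff (S : List Int) (used : List Bool) (hs : S.Pairwise (fun a b => a ≤ b))
    (hlen : used.length = S.length) (hInv : pvInv S used) (i : Nat) (hi : i < S.length) :
    S[i]'hi ∈ pvRem ((S.zip used).take i) ↔
      (0 < i ∧ S[i-1]? = some (S[i]'hi) ∧ used.getD (i-1) false = false) := by
  have hzlen : (S.zip used).length = S.length := by simp [List.length_zip, hlen]
  constructor
  · intro hmem
    obtain ⟨p, hp, hp2, hp1⟩ := (mem_pvRem _ _).mp hmem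
    obtain ⟨k, hk, hpk⟩ := List.mem_iff_getElem.mp hp
    have hkt : (S.zip used).take i = (S.zip used).take i := rfl
    have hklen : k < (List.take i (S.zip used)).length := hk
    have hki : k < i := by
      have := List.length_take_le i (S.zip used); omega
    have hkS : k < S.length := by
      have := List.length_take (i := i) (l := S.zip used); omega
    have hgz : (S.zip used)[k]'(by omega) = (S[k]'hkS, used[k]'(by omega)) :=
      List.getElem_zip ..
    rw [List.getElem_take] at hpk
    have hpk' : (S.zip used)[k]'(by omega) = p := hpk
    have hSk : S[k]'hkS = S[i]'hi := by rw [← hp1, ← hpk', hgz]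
    have husedk : used[k]'(by omega) = false := by
      have := congrArg Prod.snd hpk'; simp [hgz] at this; rw [this]; exact hp2
    have h0i : 0 < i := by omega
    -- every index between k and i carries the same value
    have hall : ∀ m, k ≤ m → m ≤ i → (hm : m < S.length) → S[m]'hm = S[i]'hi := by
      intro m h1 h2 hm
      have hle1 : S[k]'hkS ≤ S[m]'hm := pvMono S hs k m h1 hm
      have hle2 : S[m]'hm ≤ S[i]'hi := pvMono S hs m i h2 hi
      omega
    have hi1S : i - 1 < S.length := by omega
    have hSi1 : S[i-1]'hi1S = S[i]'hi := hall (i-1) (by omega) (by omega) hi1S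
    refine ⟨h0i, by rw [List.getElem?_eq_getElem hi1S, hSi1], ?_⟩
    -- used[i-1] must be false: otherwise chain down to k, contradicting used[k]=false
    by_contra hby
    have hu1 : used.getD (i-1) false = true := by
      cases h : used.getD (i-1) false with
      | false => exact absurd h hby
      | true => rfl
    have hu1' : used[i-1]? = some true := by
      rw [List.getElem?_eq_getElem (by omega : i - 1 < used.length)]
      rw [List.getD_eq_getElem _ _ (by omega : i - 1 < used.length)] at hu1
      rw [hu1]
    have hchain := pvInv_down S used hInv (i-1-k) k
      (by rw [show k + (i-1-k) = i-1 by omega]; exact hu1')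
      (by
        intro e he
        have h1 : k + e < S.length := by omega
        have h2 : k + e + 1 < S.length := by omega
        rw [List.getElem?_eq_getElem h1, List.getElem?_eq_getElem h2,
          hall (k+e) (by omega) (by omega) h1, hall (k+e+1) (by omega) (by omega) h2])
    rw [List.getElem?_eq_getElem (by omega : k < used.length)] at hchain
    simp [husedk] at hchain
  · rintro ⟨h0i, hSeq, hufalse⟩
    have hi1S : i - 1 < S.length := by omega
    have hi1u : i - 1 < used.length := by omega
    have hSi1 : S[i-1]'hi1S = S[i]'hi := by
      rw [List.getElem?_eq_getElem hi1S] at hSeq; simpa using hSeq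
    have hu1 : used[i-1]'hi1u = false := by
      rw [List.getD_eq_getElem _ _ hi1u] at hufalse; exact hufalse
    apply (mem_pvRem _ _).mpr
    refine ⟨(S[i-1]'hi1S, false), ?_, rfl, hSi1⟩
    apply List.mem_iff_getElem.mpr
    have hlt : i - 1 < (List.take i (S.zip used)).length := by
      simp [List.length_take, hzlen]; omega
    refine ⟨i-1, hlt, ?_⟩
    rw [List.getElem_take]
    rw [List.getElem_zip]
    simp [hu1]

lemma pvZipSet (S : List Int) (used : List Bool) (i : Nat) (hi : i < S.length)
    (hu : i < used.length) :
    S.zip (used.set i true) = (S.zip used).set i (S[i]'hi, true) := by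
  induction S generalizing used i with
  | nil => simp at hi
  | cons s T ih =>
    cases used with
    | nil => simp at hu
    | cons b U =>
      cases i with
      | zero => simp [List.zip_cons_cons]
      | succ j =>
        simp only [List.zip_cons_cons, List.set_cons_succ, List.getElem_cons_succ]
        rw [ih U j (by simpa using hi) (by simpa using hu)]

lemma pvInvSet (S : List Int) (used : List Bool) (hlen : used.length = S.length)
    (i : Nat) (hi : i < S.length) (hInv : pvInv S used)
    (hcond : ¬ (0 < i ∧ S[i-1]? = some (S[i]'hi) ∧ used.getD (i-1) false = false)) :
    pvInv S (used.set i true) := by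
  intro j h1 h2
  by_cases hji : j = i
  · subst hji
    rw [List.getElem?_set_self (by omega)]
  · rw [List.getElem?_set_ne (by omega : i ≠ j)]
    by_cases hj1i : j + 1 = i
    · subst hj1i
      have hcond' := hcond
      push Not at hcond'
      have hSeq : S[j+1-1]? = some (S[j+1]'hi) := by
        simp only [Nat.add_sub_cancel]
        rw [h2, List.getElem?_eq_getElem (by omega : j + 1 < S.length)]
      have hne := hcond' (by omega) hSeq
      have hgetD : used.getD (j+1-1) false = true := by
        cases h : used.getD (j+1-1) false with
        | false => exact absurd h hne
        | true => rfl
      simp only [Nat.add_sub_cancel] at hgetD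
      rw [List.getElem?_eq_getElem (by omega : j < used.length)]
      rw [List.getD_eq_getElem _ _ (by omega : j < used.length)] at hgetD
      rw [hgetD]
    · rw [List.getElem?_set_ne (by omega : i ≠ j + 1)] at h1
      exact hInv j h1 h2

lemma pvRem_replicate (S : List Int) :
    pvRem (S.zip (List.replicate S.length false)) = S := by
  induction S with
  | nil => rfl
  | cons s T ih => simpa [List.replicate_succ, List.zip_cons_cons, pvRem] using ih

lemma pvCross (S : List Int) (hs : S.Pairwise (fun a b => a ≤ b)) :
    ∀ n : Nat, ∀ used : List Bool, used.length = S.length → used.count false ≤ n →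
    pvInv S used →
    ∀ i : Nat, ∀ seen : PySem.Set Int,
      (∀ w : Int, w ∈ seen ↔ w ∈ pvRem ((S.zip used).take i)) →
    ∀ perm : List Int, ∀ target : Int,
      pvLoopA (pvRem ((S.zip used).take i)) (pvRem ((S.zip used).drop i)) seen perm target
        = pvLoopB S used i perm target := by
  intro n
  induction n using Nat.strong_induction_on with
  | _ n ihn =>
  intro used hlen hcnt hInv
  have hzlen : (S.zip used).length = S.length := by simp [hlen]
  suffices h : ∀ k i seen,
      S.length - i < k →
      (∀ w : Int, w ∈ seen ↔ w ∈ pvRem ((S.zip used).take i)) →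
      ∀ perm target,
        pvLoopA (pvRem ((S.zip used).take i)) (pvRem ((S.zip used).drop i)) seen perm target
          = pvLoopB S used i perm target by
    intro i seen hseen perm target
    exact h (S.length - i + 1) i seen (by omega) hseen perm target
  intro k
  induction k with
  | zero => intro i seen hik; omega
  | succ k ihk =>
    intro i seen hik hseen perm target
    by_cases hi : i < S.length
    · have hiu : i < used.length := by omega
      have hdropz : (S.zip used).drop i = (S[i]'hi, used[i]'hiu) :: (S.zip used).drop (i+1) := by
        rw [List.drop_eq_getElem_cons (by omega)]
        congr 1
        exact List.getElem_zip ..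
      have htake : (S.zip used).take (i+1)
          = (S.zip used).take i ++ [(S[i]'hi, used[i]'hiu)] := by
        rw [List.take_add_one, List.getElem?_eq_getElem (by omega)]
        simp [List.getElem_zip]
      cases hu : used[i]'hiu with
      | true =>
        have hpre : pvRem ((S.zip used).take (i+1)) = pvRem ((S.zip used).take i) := by
          rw [htake, pvRem_append, hu, pvRem_cons_true, pvRem_nil, List.append_nil]
        rw [pvLoopB]
        rw [dif_pos ⟨hi, hiu⟩, dif_pos hu]
        have := ihk (i+1) seen (by omega)
          (by intro w; rw [hpre]; exact hseen w) perm target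
        rw [hpre] at this
        rw [hdropz, hu, pvRem_cons_true]
        exact this
      | false =>
        rw [hdropz, hu, pvRem_cons_false]
        rw [pvLoopA]
        rw [pvLoopB, dif_pos ⟨hi, hiu⟩, dif_neg (by simp [hu])]
        by_cases ht : target < S[i]'hi
        · rw [if_pos ht, if_pos ht]
        · rw [if_neg ht, if_neg ht]
          have hCiff : PySem.Set.contains seen (S[i]'hi) = true ↔
              (0 < i ∧ S[i-1]? = some (S[i]'hi) ∧ used.getD (i-1) false = false) := by
            rw [PySem.Set.contains_iff, hseen]
            exact pvSeen_iff S used hs hlen hInv i hi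
          have hpre : pvRem ((S.zip used).take (i+1))
              = pvRem ((S.zip used).take i) ++ [S[i]'hi] := by
            rw [htake, pvRem_append, hu, pvRem_cons_false, pvRem_nil]
          by_cases hC : (0 < i ∧ S[i-1]? = some (S[i]'hi) ∧ used.getD (i-1) false = false)
          · rw [if_pos (hCiff.mpr hC), if_pos hC]
            have hseen' : ∀ w : Int, w ∈ seen ↔ w ∈ pvRem ((S.zip used).take (i+1)) := by
              intro w
              rw [hpre, List.mem_append, List.mem_singleton, hseen]
              constructor
              · exact Or.inl
              · rintro (h | h)
                · exact h
                · subst h; exact (pvSeen_iff S used hs hlen hInv i hi).mpr hC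
            have := ihk (i+1) seen (by omega) hseen' perm target
            rw [hpre] at this
            exact this
          · rw [if_neg (by rw [← hCiff] at hC; simpa using hC), if_neg hC]
            congr 1
            · -- recursion into the next level: fixed array + updated mask vs sliced copy
              rw [pvGetPermsA, pvGetPermsB]
              congr 1
              have hZ' : S.zip (used.set i true) = (S.zip used).set i (S[i]'hi, true) :=
                pvZipSet S used i hi hiu
              have hlen' : (used.set i true).length = S.length := by simp [hlen]
              have hrem' : pvRem (S.zip (used.set i true))
                  = pvRem ((S.zip used).take i) ++ pvRem ((S.zip used).drop (i+1)) := by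
                rw [hZ']
                conv_lhs => rw [← List.take_append_drop i ((S.zip used).set i (S[i]'hi, true))]
                rw [pvRem_append, List.take_set_of_le (le_refl i)]
                congr 1
                rw [List.drop_eq_getElem_cons (by simp [hzlen]; omega)]
                rw [List.getElem_set_self (by simp [hzlen]; omega)]
                rw [List.drop_set_of_lt (by omega)]
                rw [pvRem_cons_true]
              have hmem : false ∈ used := by rw [← hu]; exact List.getElem_mem hiu
              have hcnt0 : 0 < used.count false := List.count_pos_iff.mpr hmem
              have hcnt' : (used.set i true).count false ≤ n - 1 := by
                have := pvCountFalseSet used i hiu hu; omega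
              have hn1 : 1 ≤ n := le_trans hcnt0 hcnt
              have hkey := ihn (n-1) (by omega) (used.set i true) hlen' hcnt'
                (pvInvSet S used hlen i hi hInv hC) 0 PySem.Set.empty
                (by intro w; simp [PySem.Set.empty, pvRem]) (perm ++ [S[i]'hi]) (target - S[i]'hi)
              rw [List.take_zero, List.drop_zero, pvRem_nil, hrem'] at hkey
              exact hkey
            · have hseen2 : ∀ w : Int, w ∈ PySem.Set.add seen (S[i]'hi) ↔
                  w ∈ pvRem ((S.zip used).take (i+1)) := by
                intro w
                rw [hpre, List.mem_append, List.mem_singleton, PySem.Set.mem_add, hseen]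
              have := ihk (i+1) (PySem.Set.add seen (S[i]'hi)) (by omega) hseen2 perm target
              rw [hpre] at this
              exact this
    · have hdrop : (S.zip used).drop i = [] := by
        apply List.drop_eq_nil_of_le; omega
      rw [hdrop, pvRem_nil, pvLoopA]
      rw [pvLoopB, dif_neg (by omega)]

-- ===== VERDICT (by name: the statement is the Claim_ definition above) =====
theorem permutationSum3_spec : Claim_equal_permutationSum3 := by
  intro A B _
  unfold Spec_permutationSum3 permutationSum3 permutationSum3_alt
  have hs : (PySem.List.sorted A (fun x => x) false).Pairwise (fun a b => a ≤ b) :=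
    PySem.List.sorted_pairwise A (fun x => x)
  set S := PySem.List.sorted A (fun x => x) false with hS
  rw [pvGetPermsA, pvGetPermsB]
  congr 1
  have hInv0 : pvInv S (List.replicate S.length false) := by
    intro j h1 _
    exfalso
    rw [List.getElem?_replicate] at h1
    by_cases h : j + 1 < S.length <;> simp [h] at h1
  have := pvCross S hs S.length (List.replicate S.length false) (by simp)
    (by simp) hInv0 0 PySem.Set.empty
    (by intro w; simp [PySem.Set.empty, pvRem]) [] B
  rw [List.take_zero, List.drop_zero, pvRem_nil, pvRem_replicate] at this
  exact this
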